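-- pv_equiv track=rewrite | github.com/Eckersleyful/bigdataentityresolution | graph_building.py | calculate_cardinality_node_pruning
-- ===== SOURCE A (Python) =====
-- import math
--
-- def calculate_neighbor_k(node_neighbors):
--     return int(math.ceil(0.1*len(node_neighbors)))
--
-- def get_node_neighbors(node, edges, weighted_edges):
--     #list of tuples where 0 is
--     list_of_neighbor_edges = []
--     current_edge_index = 0
--     for edge in edges:
--         if node == list(edge)[0] or node == list(edge)[1]:
--
--            list_of_neighbor_edges.append((current_edge_index, weighted_edges[current_edge_index]))
--         current_edge_index += 1
--     return list_of_neighbor_edges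
--
-- def calculate_cardinality_node_pruning(nodes, edges, weighted_edges):
--     new_directed_edges = []
--
--     for node in nodes:
--         #get all neighbouring edges for a node and their weights as a list of tuples
--         node_neighbors = get_node_neighbors(node, edges, weighted_edges)
--         #sort the neighboring edges of the node by their weight
--         sorted_neighbor_weights = sorted(node_neighbors, key = lambda weigh: weigh[1], reverse = True)
--
--         #calculate k-value
--         k_value = calculate_neighbor_k(node_neighbors)
--         #select k elements from the sorted edges
--         k_ranked_node_neighbors = sorted_neighbor_weights[:k_value]
--
--         #create directed edges from the k-top edges
--         for edge_tuple in k_ranked_node_neighbors: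
--             #here edge_tuple[0] is the corresponding index found in neighbor creation function
--             old_edge = list(edges[edge_tuple[0]])
--
--             #check if the current node is the root of the edge
--
--             if old_edge[0] == node:
--                 new_directed_edges.append(old_edge)
--             else:
--                 old_edge.reverse()
--                 new_directed_edges.append(old_edge)
--
--     return new_directed_edges
-- ===== SOURCE B (Python) =====
-- import math
--
-- def calculate_cardinality_node_pruning(nodes, edges, weighted_edges):
--     # Build (endpoint, (weight, directed_edge)) pairs in one pass over the edges,
--     # then group them into an adjacency index; each node is then handled by one
--     # local stable sort instead of a full scan of all edges.
--     pairs = []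
--     for (u, v), w in zip(edges, weighted_edges):
--         pairs.append((u, (w, [u, v])))
--         if v != u:
--             pairs.append((v, (w, [v, u])))
--     incident = {}
--     for key, item in pairs:
--         incident.setdefault(key, []).append(item)
--     result = []
--     for node in nodes:
--         neigh = incident.get(node, [])
--         k = math.ceil(0.1 * len(neigh))
--         for _, directed in sorted(neigh, key=lambda t: t[0], reverse=True)[:k]:
--             result.append(directed)
--     return result
-- ===== Notes on version B (the rewrite author's own statement) =====
-- stated objective: faster
-- what changed: B replaces A's per-node full scan of the edge list (get_node_neighbors inside the node loop) by a single pass over zip(edges, weighted_edges) that builds a node->incident-(weight, directed edge) adjacency index, after which each node needs only one local stable sort and no edge indexing.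
import Mathlib
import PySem

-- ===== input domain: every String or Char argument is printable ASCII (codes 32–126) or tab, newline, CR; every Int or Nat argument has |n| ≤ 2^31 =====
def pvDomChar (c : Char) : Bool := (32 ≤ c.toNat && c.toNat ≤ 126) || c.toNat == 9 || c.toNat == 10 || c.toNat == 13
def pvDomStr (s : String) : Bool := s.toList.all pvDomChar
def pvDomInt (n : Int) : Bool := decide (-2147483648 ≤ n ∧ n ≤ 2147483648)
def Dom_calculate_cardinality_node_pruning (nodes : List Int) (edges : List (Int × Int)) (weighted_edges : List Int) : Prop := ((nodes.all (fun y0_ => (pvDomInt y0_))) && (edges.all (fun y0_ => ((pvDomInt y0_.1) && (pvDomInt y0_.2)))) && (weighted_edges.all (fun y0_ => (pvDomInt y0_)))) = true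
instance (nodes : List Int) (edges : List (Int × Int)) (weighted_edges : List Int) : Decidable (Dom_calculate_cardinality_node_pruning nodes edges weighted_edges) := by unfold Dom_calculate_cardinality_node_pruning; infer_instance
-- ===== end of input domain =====

-- B builds a node→incident-edge adjacency index in one pass over zip(edges, weighted_edges)
-- instead of A's full scan of all edges for every node; equivalence of the return values is
-- proved on Pre_ (the inputs where A raises no IndexError).

-- ===== PORT A =====

-- int(math.ceil(0.1*len(xs))) ported as the integer ceiling (len+9)/10 (exact for the
-- machine-representable list lengths; checked exhaustively in Python up to 2*10^6)
def calculate_neighbor_k (node_neighbors : List (Int × Int)) : Int :=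
  (((node_neighbors.length + 9) / 10 : Nat) : Int)

def get_node_neighbors (node : Int) (edges : List (Int × Int)) (weighted_edges : List Int) : List (Int × Int) :=
  -- weighted_edges[current_edge_index] raises IndexError out of range (excluded by Pre_;
  -- the default of pyGetD is never read inside Pre_)
  (edges.foldl
    (fun (st : List (Int × Int) × Int) edge =>
      (if node = edge.1 ∨ node = edge.2 then
         st.1 ++ [(st.2, PySem.List.pyGetD weighted_edges st.2 0)]
       else st.1,
       st.2 + 1))
    ([], 0)).1

def calculate_cardinality_node_pruning (nodes : List Int) (edges : List (Int × Int)) (weighted_edges : List Int) : List (List Int) :=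
  nodes.foldl
    (fun new_directed_edges node =>
      let node_neighbors := get_node_neighbors node edges weighted_edges
      let sorted_neighbor_weights := PySem.List.sorted node_neighbors (fun weigh => weigh.2) true
      let k_value := calculate_neighbor_k node_neighbors
      let k_ranked_node_neighbors := PySem.List.slice sorted_neighbor_weights none (some k_value)
      k_ranked_node_neighbors.foldl
        (fun acc edge_tuple =>
          -- edges[edge_tuple[0]]: the stored index is always in range (default never read)
          let old_edge := PySem.List.pyGetD edges edge_tuple.1 (0, 0)
          if old_edge.1 = node then acc ++ [[old_edge.1, old_edge.2]]
          else acc ++ [[old_edge.2, old_edge.1]])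
        new_directed_edges)
    []

-- ===== PORT B =====

-- one pass over zip(edges, weighted_edges): (endpoint, (weight, directed edge)) pairs
def pvIncidencePairs (edges : List (Int × Int)) (weighted_edges : List Int) : List (Int × (Int × List Int)) :=
  (edges.zip weighted_edges).foldl
    (fun pairs p =>
      pairs ++ ((p.1.1, (p.2, [p.1.1, p.1.2])) ::
        (if p.1.2 ≠ p.1.1 then [(p.1.2, (p.2, [p.1.2, p.1.1]))] else [])))
    []

-- incident.setdefault(key, []).append(item)
def pvIncidenceIndex (edges : List (Int × Int)) (weighted_edges : List Int) : PySem.Dict Int (List (Int × List Int)) :=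
  (pvIncidencePairs edges weighted_edges).foldl
    (fun d q => d.modify q.1 [] (fun l => l ++ [q.2])) PySem.Dict.empty

def calculate_cardinality_node_pruning_alt (nodes : List Int) (edges : List (Int × Int)) (weighted_edges : List Int) : List (List Int) :=
  let incident := pvIncidenceIndex edges weighted_edges
  nodes.foldl
    (fun result node =>
      let neigh := incident.getD node []
      -- math.ceil(0.1 * len(neigh)) as the exact integer ceiling, as in port A
      let k := (neigh.length + 9) / 10
      ((PySem.List.sorted neigh (fun t => t.1) true).take k).foldl
        (fun res t => res ++ [t.2]) result)
    []

-- ===== PRECONDITION & SPEC =====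
-- Pre_ excludes exactly the inputs where A raises IndexError: an edge incident to some
-- listed node whose index is not a valid index into weighted_edges.
def Pre_calculate_cardinality_node_pruning (nodes : List Int) (edges : List (Int × Int)) (weighted_edges : List Int) : Prop :=
  ∀ q ∈ PySem.List.enumerate edges 0, (q.2.1 ∈ nodes ∨ q.2.2 ∈ nodes) → q.1 < (weighted_edges.length : Int)
instance (nodes : List Int) (edges : List (Int × Int)) (weighted_edges : List Int) : Decidable (Pre_calculate_cardinality_node_pruning nodes edges weighted_edges) := by unfold Pre_calculate_cardinality_node_pruning; infer_instance

def pvWitness_calculate_cardinality_node_pruning : List Int × (List (Int × Int)) × List Int :=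
  ([1, 2], [(1, 2), (2, 3)], [5, 7])

def Spec_calculate_cardinality_node_pruning (nodes : List Int) (edges : List (Int × Int)) (weighted_edges : List Int) (out : List (List Int)) : Prop := out = calculate_cardinality_node_pruning_alt nodes edges weighted_edges
instance (nodes : List Int) (edges : List (Int × Int)) (weighted_edges : List Int) (out : List (List Int)) : Decidable (Spec_calculate_cardinality_node_pruning nodes edges weighted_edges out) := by unfold Spec_calculate_cardinality_node_pruning; infer_instance

-- ===== CLAIM (what is proved, stated in full; the proofs are below) =====
def Claim_equal_calculate_cardinality_node_pruning : Prop := ∀ (nodes : List Int) (edges : List (Int × Int)) (weighted_edges : List Int), Dom_calculate_cardinality_node_pruning nodes edges weighted_edges → Pre_calculate_cardinality_node_pruning nodes edges weighted_edges → Spec_calculate_cardinality_node_pruning nodes edges weighted_edges (calculate_cardinality_node_pruning nodes edges weighted_edges)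

-- ===== LEMMAS AND PROOFS =====

-- the incidence test, Bool-valued
def pvIncB (node : Int) (e : Int × Int) : Bool := decide (node = e.1) || decide (node = e.2)

-- common reference list for one node: enumerated, weight-paired incident edges
def pvE (node : Int) (edges : List (Int × Int)) (weighted_edges : List Int) : List (Int × ((Int × Int) × Int)) :=
  (PySem.List.enumerate (edges.zip weighted_edges) 0).filter (fun q => pvIncB node q.2.1)

-- the (weight, directed edge) payload B stores for one endpoint of one incident edge
def pvPayload (node : Int) (p : (Int × Int) × Int) : Int × List Int :=
  (p.2, if p.1.1 = node then [p.1.1, p.1.2] else [p.1.2, p.1.1])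

-- A's neighbor loop: filter/map over the enumerated edge list
lemma gnn_aux (node : Int) (weighted_edges : List Int) :
    ∀ (edges : List (Int × Int)) (i : Int) (acc : List (Int × Int)),
    (edges.foldl
      (fun (st : List (Int × Int) × Int) edge =>
        (if node = edge.1 ∨ node = edge.2 then
           st.1 ++ [(st.2, PySem.List.pyGetD weighted_edges st.2 0)]
         else st.1,
         st.2 + 1))
      (acc, i)).1
    = acc ++ ((PySem.List.enumerate edges i).filter (fun q => pvIncB node q.2)).map
        (fun q => (q.1, PySem.List.pyGetD weighted_edges q.1 0)) := by
  intro edges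
  induction edges with
  | nil => intro i acc; simp [PySem.List.enumerate]
  | cons e es ih =>
    intro i acc
    rw [List.foldl_cons, PySem.List.enumerate_cons, List.filter_cons]
    by_cases hc : node = e.1 ∨ node = e.2
    · simp only [if_pos hc, ih, pvIncB]
      have hb : (decide (node = e.1) || decide (node = e.2)) = true := by simp [hc]
      simp [hb]
    · simp only [if_neg hc, ih, pvIncB]
      have hb : (decide (node = e.1) || decide (node = e.2)) = false := by
        rcases not_or.1 hc with ⟨h1, h2⟩; simp [h1, h2]
      simp [hb]

lemma gnn_eq (node : Int) (edges : List (Int × Int)) (weighted_edges : List Int) :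
    get_node_neighbors node edges weighted_edges
    = ((PySem.List.enumerate edges 0).filter (fun q => pvIncB node q.2)).map
        (fun q => (q.1, PySem.List.pyGetD weighted_edges q.1 0)) := by
  unfold get_node_neighbors
  simpa using gnn_aux node weighted_edges edges 0 []

-- under the in-range hypothesis, the filtered enumerated edges are the filtered enumerated zip
lemma enum_filter_zip (node : Int) :
    ∀ (edges : List (Int × Int)) (ws : List Int) (s : Int),
    (∀ q ∈ PySem.List.enumerate edges s, pvIncB node q.2 = true → q.1 - s < (ws.length : Int)) →
    (PySem.List.enumerate edges s).filter (fun q => pvIncB node q.2)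
    = ((PySem.List.enumerate (edges.zip ws) s).filter (fun q => pvIncB node q.2.1)).map
        (fun q => (q.1, q.2.1)) := by
  intro edges
  induction edges with
  | nil => intro ws s h; simp [PySem.List.enumerate]
  | cons e es ih =>
    intro ws s h
    cases ws with
    | nil =>
      have hz : (e :: es).zip ([] : List Int) = [] := List.zip_nil_right
      rw [hz]
      have he : PySem.List.enumerate ([] : List ((Int × Int) × Int)) s = [] := rfl
      rw [he, List.filter_nil, List.map_nil, List.filter_eq_nil_iff]
      intro q hq hb
      have h1 := h q hq hb
      rcases (PySem.List.mem_enumerate_iff _ _ _).1 hq with ⟨k, hk, rfl⟩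
      simp at h1
      omega
    | cons w ws' =>
      rw [List.zip_cons_cons, PySem.List.enumerate_cons, PySem.List.enumerate_cons,
        List.filter_cons, List.filter_cons]
      have hrec := ih ws' (s+1) (by
        intro q hq hb
        have hmem : q ∈ PySem.List.enumerate (e :: es) s := by
          rw [PySem.List.enumerate_cons]; exact List.mem_cons_of_mem _ hq
        have h2 := h q hmem hb
        simp only [List.length_cons] at h2 ⊢
        push_cast at h2 ⊢
        omega)
      by_cases hc : pvIncB node e = true
      · simp [hc, hrec]
      · simp [eq_false_of_ne_true hc, hrec]

-- membership facts about the reference list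
lemma pvE_mem (node : Int) (edges : List (Int × Int)) (ws : List Int)
    (q : Int × ((Int × Int) × Int)) (hq : q ∈ pvE node edges ws) :
    PySem.List.pyGetD edges q.1 (0, 0) = q.2.1 ∧ PySem.List.pyGetD ws q.1 0 = q.2.2 := by
  have hq' := List.mem_of_mem_filter hq
  rcases (PySem.List.mem_enumerate_iff _ _ _).1 hq' with ⟨k, hk, rfl⟩
  have hkl : k < edges.length := by
    have := hk; rw [List.length_zip] at this; omega
  have hkw : k < ws.length := by
    have := hk; rw [List.length_zip] at this; omega
  have hz : (edges.zip ws)[k] = (edges[k], ws[k]) := List.getElem_zip ..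
  simp only [zero_add, hz]
  constructor
  · rw [PySem.List.pyGetD_natCast, List.getD_eq_getElem _ _ hkl]
  · rw [PySem.List.pyGetD_natCast, List.getD_eq_getElem _ _ hkw]

lemma flatMap_if_singleton {α β : Type} (c : α → Bool) (F : α → β) :
    ∀ l : List α, (l.flatMap (fun x => if c x then [F x] else [])) = (l.filter c).map F := by
  intro l
  induction l with
  | nil => rfl
  | cons a t ih =>
    rw [List.flatMap_cons, List.filter_cons]
    by_cases hc : c a = true
    · simp [hc, ih]
    · simp [eq_false_of_ne_true hc, ih]

-- what B's pair list contributes at key `node` for one zipped edge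
lemma pairs_elem (node : Int) (p : (Int × Int) × Int) :
    (((p.1.1, (p.2, [p.1.1, p.1.2])) ::
        (if p.1.2 ≠ p.1.1 then [(p.1.2, (p.2, [p.1.2, p.1.1]))] else [])).filter
      (fun q => q.1 == node)).map (fun q => q.2)
    = if pvIncB node p.1 then [pvPayload node p] else [] := by
  rcases p with ⟨⟨u, v⟩, w⟩
  simp only [pvIncB, pvPayload]
  by_cases h1 : u = node
  · subst h1
    by_cases h2 : v = u
    · subst h2; simp
    · simp [h2]
  · by_cases h3 : v = node
    · subst h3
      simp [h1, show v ≠ u from fun h => h1 h.symm]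
    · simp [h1, show ¬ node = u from fun h => h1 h.symm, show ¬ node = v from fun h => h3 h.symm,
        show ¬ v = node from h3]

-- B's neighbor list is a map over the same reference list
lemma alt_neigh (node : Int) (edges : List (Int × Int)) (ws : List Int) :
    (pvIncidenceIndex edges ws).getD node []
    = (pvE node edges ws).map (fun q => pvPayload node q.2) := by
  unfold pvIncidenceIndex
  rw [PySem.Dict.getD_foldl_modify_append, PySem.Dict.getD_empty, List.nil_append]
  unfold pvIncidencePairs
  rw [PySem.List.foldl_append_eq_flatMap, List.nil_append, List.filter_flatMap, List.map_flatMap]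
  have h1 : (edges.zip ws).flatMap
      (fun p => (((p.1.1, (p.2, [p.1.1, p.1.2])) ::
        (if p.1.2 ≠ p.1.1 then [(p.1.2, (p.2, [p.1.2, p.1.1]))] else [])).filter
          (fun q => q.1 == node)).map (fun q => q.2))
      = (edges.zip ws).flatMap (fun p => if pvIncB node p.1 then [pvPayload node p] else []) := by
    apply List.flatMap_congr
    intro p _
    exact pairs_elem node p
  rw [h1, flatMap_if_singleton]
  unfold pvE
  conv_lhs => rw [← PySem.List.map_snd_enumerate (edges.zip ws) 0]
  rw [List.filter_map, List.map_map]
  rfl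

-- stable sort commutes with a key-preserving map
lemma insertBy_map {α β : Type} (g : α → β) (B1 : α → α → Bool) (B2 : β → β → Bool)
    (hB : ∀ a b, B2 (g a) (g b) = B1 a b) (x : α) :
    ∀ ys : List α, PySem.List.insertBy B2 (g x) (ys.map g) = (PySem.List.insertBy B1 x ys).map g := by
  intro ys
  induction ys with
  | nil => rfl
  | cons y t ih =>
    simp only [List.map_cons, PySem.List.insertBy, hB]
    by_cases hb : B1 x y = true
    · simp [hb]
    · simp [eq_false_of_ne_true hb, ih]

lemma foldl_insertBy_map {α β : Type} (g : α → β) (B1 : α → α → Bool) (B2 : β → β → Bool)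
    (hB : ∀ a b, B2 (g a) (g b) = B1 a b) :
    ∀ (l : List α) (ys : List α),
    (l.map g).foldl (fun acc x => PySem.List.insertBy B2 x acc) (ys.map g)
    = (l.foldl (fun acc x => PySem.List.insertBy B1 x acc) ys).map g := by
  intro l
  induction l with
  | nil => intro ys; rfl
  | cons a t ih =>
    intro ys
    simp only [List.map_cons, List.foldl_cons]
    rw [insertBy_map g B1 B2 hB a ys, ih]

lemma sorted_rev_map {α β : Type} (g : α → β) (key : β → Int) (l : List α) :
    PySem.List.sorted (l.map g) key true = (PySem.List.sorted l (fun x => key (g x)) true).map g := by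
  rw [PySem.List.sorted_rev_eq_foldl_insertBy, PySem.List.sorted_rev_eq_foldl_insertBy]
  have := foldl_insertBy_map g
    (fun a b => decide (key (g b) < key (g a))) (fun a b => decide (key b < key a))
    (fun a b => rfl) l []
  simpa using this

-- A's emission loop as a map
lemma foldl_emit (node : Int) (edges : List (Int × Int)) :
    ∀ (l : List (Int × Int)) (acc : List (List Int)),
    l.foldl
      (fun acc edge_tuple =>
        let old_edge := PySem.List.pyGetD edges edge_tuple.1 (0, 0)
        if old_edge.1 = node then acc ++ [[old_edge.1, old_edge.2]]
        else acc ++ [[old_edge.2, old_edge.1]]) acc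
    = acc ++ l.map (fun t =>
        let e := PySem.List.pyGetD edges t.1 (0, 0)
        if e.1 = node then [e.1, e.2] else [e.2, e.1]) := by
  intro l
  induction l with
  | nil => intro acc; simp
  | cons a t ih =>
    intro acc
    rw [List.foldl_cons, List.map_cons]
    dsimp only
    by_cases hc : (PySem.List.pyGetD edges a.1 (0, 0)).1 = node
    · rw [if_pos hc, if_pos hc, ih]; simp
    · rw [if_neg hc, if_neg hc, ih]; simp

-- A's neighbor list is a map over the same reference list
lemma gnn_pvE (node : Int) (edges : List (Int × Int)) (ws : List Int)
    (h : ∀ q ∈ PySem.List.enumerate edges 0, pvIncB node q.2 = true → q.1 < (ws.length : Int)) :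
    get_node_neighbors node edges ws = (pvE node edges ws).map (fun q => (q.1, q.2.2)) := by
  rw [gnn_eq, enum_filter_zip node edges ws 0 (by intro q hq hb; have := h q hq hb; omega)]
  rw [List.map_map]
  apply List.map_congr_left
  intro q hq
  have h2 := (pvE_mem node edges ws q hq).2
  simp [Function.comp, h2]

-- the per-node block of A equals the per-node block of B
lemma block_eq (node : Int) (edges : List (Int × Int)) (ws : List Int) (acc : List (List Int))
    (h : ∀ q ∈ PySem.List.enumerate edges 0, pvIncB node q.2 = true → q.1 < (ws.length : Int)) :
    (PySem.List.slice
        (PySem.List.sorted (get_node_neighbors node edges ws) (fun weigh => weigh.2) true)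
        none (some (calculate_neighbor_k (get_node_neighbors node edges ws)))).foldl
      (fun acc edge_tuple =>
        let old_edge := PySem.List.pyGetD edges edge_tuple.1 (0, 0)
        if old_edge.1 = node then acc ++ [[old_edge.1, old_edge.2]]
        else acc ++ [[old_edge.2, old_edge.1]]) acc
    = ((PySem.List.sorted ((pvIncidenceIndex edges ws).getD node []) (fun t => t.1) true).take
        ((((pvIncidenceIndex edges ws).getD node []).length + 9) / 10)).foldl
        (fun res t => res ++ [t.2]) acc := by
  have hA := gnn_pvE node edges ws h
  have hB := alt_neigh node edges ws
  rw [hA, hB]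
  have hsortA : PySem.List.sorted ((pvE node edges ws).map (fun q => (q.1, q.2.2)))
      (fun weigh => weigh.2) true
      = (PySem.List.sorted (pvE node edges ws) (fun q => q.2.2) true).map (fun q => (q.1, q.2.2)) := by
    rw [sorted_rev_map]
  have hsortB : PySem.List.sorted ((pvE node edges ws).map (fun q => pvPayload node q.2))
      (fun t => t.1) true
      = (PySem.List.sorted (pvE node edges ws) (fun q => q.2.2) true).map (fun q => pvPayload node q.2) := by
    rw [sorted_rev_map]; rfl
  rw [hsortA, hsortB]
  have hk : calculate_neighbor_k ((pvE node edges ws).map (fun q => (q.1, q.2.2)))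
      = ((((pvE node edges ws).length + 9) / 10 : Nat) : Int) := by
    simp [calculate_neighbor_k]
  rw [hk, PySem.List.slice_to _ (Int.natCast_nonneg _), Int.toNat_natCast]
  have hlen : ((pvE node edges ws).map (fun q => pvPayload node q.2)).length
      = (pvE node edges ws).length := List.length_map ..
  rw [hlen, ← List.map_take, ← List.map_take]
  rw [foldl_emit, PySem.List.foldl_append_singleton_eq_map]
  congr 1
  rw [List.map_map, List.map_map]
  apply List.map_congr_left
  intro q hq
  have hq2 : q ∈ pvE node edges ws :=
    (PySem.List.mem_sorted _ _ _ _).1 (List.mem_of_mem_take hq)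
  have h1 := (pvE_mem node edges ws q hq2).1
  simp only [Function.comp, pvPayload, h1]

-- ===== VERDICT (by name: the statement is the Claim_ definition above) =====
theorem calculate_cardinality_node_pruning_spec : Claim_equal_calculate_cardinality_node_pruning := by
  intro nodes edges weighted_edges _ hpre
  unfold Spec_calculate_cardinality_node_pruning
  unfold calculate_cardinality_node_pruning calculate_cardinality_node_pruning_alt
  apply PySem.List.foldl_congr_mem
  intro acc node hnode
  have h : ∀ q ∈ PySem.List.enumerate edges 0, pvIncB node q.2 = true →
      q.1 < (weighted_edges.length : Int) := by
    intro q hq hb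
    apply hpre q hq
    have hb' : node = q.2.1 ∨ node = q.2.2 := by
      simpa [pvIncB] using hb
    rcases hb' with hb' | hb'
    · exact Or.inl (hb' ▸ hnode)
    · exact Or.inr (hb' ▸ hnode)
  exact block_eq node edges weighted_edges acc h
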